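-- pv_equiv track=rewrite | github.com/qAp/climatools | climatools/misc.py | Fortran_subroutine_parents_dict
-- ===== SOURCE A (Python) =====
-- def Fortran_subroutine_parents_dict(subr_childs_dict):
--     '''
--     INPUT:
--     subr_childs_dict --- dictionary of subroutines and their child subroutines
--     OUTPUT:
--     subr_parents_dict --- dictionary of subroutines and their parent subroutines
--     '''
--     subr_parents_dict = {}
--     for name in subr_childs_dict.keys():
--         subr_parents_dict[name] = []
--         for potential_parent, childs in subr_childs_dict.items():
--             if name in childs:
--                 subr_parents_dict[name].append(potential_parent)
--     return subr_parents_dict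
-- ===== SOURCE B (Python) =====
-- def Fortran_subroutine_parents_dict(subr_childs_dict):
--     parents = {}
--     for parent, childs in subr_childs_dict.items():
--         for child in dict.fromkeys(childs):
--             parents.setdefault(child, []).append(parent)
--     return {name: parents.get(name, []) for name in subr_childs_dict}
-- ===== Notes on version B (the rewrite author's own statement) =====
-- stated objective: faster
-- what changed: Replaces A's per-key rescan of the whole dict by a single inversion pass that appends each parent to a setdefault-grown parents map over its (deduplicated) children, then one final comprehension over the keys reads the map.
import Mathlib
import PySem

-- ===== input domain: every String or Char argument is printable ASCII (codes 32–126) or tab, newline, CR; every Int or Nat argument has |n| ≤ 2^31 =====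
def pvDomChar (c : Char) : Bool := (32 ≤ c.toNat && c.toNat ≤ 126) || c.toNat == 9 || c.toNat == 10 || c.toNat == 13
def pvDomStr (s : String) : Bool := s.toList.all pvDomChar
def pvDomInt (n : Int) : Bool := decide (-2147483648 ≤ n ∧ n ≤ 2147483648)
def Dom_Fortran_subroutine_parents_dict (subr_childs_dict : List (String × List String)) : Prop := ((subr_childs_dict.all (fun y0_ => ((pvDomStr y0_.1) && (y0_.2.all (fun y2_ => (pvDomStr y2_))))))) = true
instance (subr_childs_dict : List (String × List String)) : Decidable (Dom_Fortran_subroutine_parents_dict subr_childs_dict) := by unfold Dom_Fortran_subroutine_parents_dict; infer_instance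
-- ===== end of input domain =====

-- B replaces A's per-key rescan of all items by one inversion pass growing a parents map with
-- setdefault-append, read out by a final comprehension over the keys; objective: faster.

-- ===== PORT A =====
-- A: for each name in the dict's keys, reset result[name] to [] and scan ALL items,
-- appending every parent whose child list contains name.
def Fortran_subroutine_parents_dict (subr_childs_dict : List (String × List String)) : List (String × List String) :=
  let d := (subr_childs_dict.map Prod.fst).foldl
    (fun d name =>
      let d := d.insert name ([] : List String)
      subr_childs_dict.foldl
        (fun d q => if name ∈ q.2 then d.modify name [] (fun v => v ++ [q.1]) else d) d)
    PySem.Dict.empty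
  d.items

-- ===== PORT B =====
-- B: one pass over the items growing `parents` by setdefault(child, []).append(parent)
-- over each deduplicated child list, then a final comprehension {name: parents.get(name, [])}.
def Fortran_subroutine_parents_dict_alt (subr_childs_dict : List (String × List String)) : List (String × List String) :=
  let parents := subr_childs_dict.foldl
    (fun d p => (PySem.List.dedup p.2).foldl
      (fun d c => d.modify c [] (fun v => v ++ [p.1])) d)
    PySem.Dict.empty
  ((subr_childs_dict.map Prod.fst).foldl
    (fun d name => d.insert name (parents.getD name [])) PySem.Dict.empty).items

-- ===== PRECONDITION & SPEC =====
-- Pre_ excludes association lists with duplicate keys: A's Python argument is a dict, which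
-- cannot hold duplicate keys, so such lists represent no input A is ever run on.
def Pre_Fortran_subroutine_parents_dict (subr_childs_dict : List (String × List String)) : Prop :=
  (subr_childs_dict.map Prod.fst).Nodup
instance (subr_childs_dict : List (String × List String)) : Decidable (Pre_Fortran_subroutine_parents_dict subr_childs_dict) := by unfold Pre_Fortran_subroutine_parents_dict; infer_instance

def pvWitness_Fortran_subroutine_parents_dict : (List (String × List String)) :=
  [("a", ["b", "c"]), ("b", ["c"]), ("c", [])]

def Spec_Fortran_subroutine_parents_dict (subr_childs_dict : List (String × List String)) (out : List (String × List String)) : Prop := out = Fortran_subroutine_parents_dict_alt subr_childs_dict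
instance (subr_childs_dict : List (String × List String)) (out : List (String × List String)) : Decidable (Spec_Fortran_subroutine_parents_dict subr_childs_dict out) := by unfold Spec_Fortran_subroutine_parents_dict; infer_instance

-- ===== CLAIM (what is proved, stated in full; the proofs are below) =====
def Claim_equal_Fortran_subroutine_parents_dict : Prop := ∀ (subr_childs_dict : List (String × List String)), Dom_Fortran_subroutine_parents_dict subr_childs_dict → Pre_Fortran_subroutine_parents_dict subr_childs_dict → Spec_Fortran_subroutine_parents_dict subr_childs_dict (Fortran_subroutine_parents_dict subr_childs_dict)

-- ===== LEMMAS AND PROOFS =====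

-- parents of k: the parents whose child list contains k, in item order
def pvParents (l : List (String × List String)) (k : String) : List String :=
  (l.filter (fun q => k ∈ q.2)).map Prod.fst

-- A's inner scan, named for the lemmas
def subr_foldA (l : List (String × List String)) (name : String)
    (d : PySem.Dict String (List String)) : PySem.Dict String (List String) :=
  l.foldl (fun d q => if name ∈ q.2 then d.modify name [] (fun v => v ++ [q.1]) else d) d

-- ---- A side ----

-- A's inner scan touches only key `name`: it appends pvParents there, leaves other keys alone.
theorem innerA_getD (l : List (String × List String)) (name k : String) :
    ∀ d : PySem.Dict String (List String),
      (subr_foldA l name d).getD k []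
        = if k = name then d.getD name [] ++ pvParents l name else d.getD k [] := by
  induction l with
  | nil =>
    intro d
    by_cases hk : k = name
    · subst hk; simp [subr_foldA, pvParents]
    · simp [subr_foldA, hk]
  | cons q l ih =>
    intro d
    simp only [subr_foldA, List.foldl_cons]
    by_cases hq : name ∈ q.2
    · simp only [if_pos hq]
      rw [show (List.foldl (fun d q => if name ∈ q.2 then d.modify name [] (fun v => v ++ [q.1]) else d)
            (d.modify name [] (fun v => v ++ [q.1])) l) = subr_foldA l name (d.modify name [] (fun v => v ++ [q.1])) from rfl, ih]
      by_cases hk : k = name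
      · subst hk
        simp [PySem.Dict.getD_modify_self, pvParents, hq]
      · simp [hk, PySem.Dict.getD_modify_of_ne _ _ _ (by exact hk)]
    · simp only [if_neg hq]
      rw [show (List.foldl (fun d q => if name ∈ q.2 then d.modify name [] (fun v => v ++ [q.1]) else d)
            d l) = subr_foldA l name d from rfl, ih]
      by_cases hk : k = name
      · subst hk; simp [pvParents, hq]
      · simp [hk]

-- A's inner scan does not change the key list when `name` is already a key.
theorem innerA_keys (l : List (String × List String)) (name : String) :
    ∀ d : PySem.Dict String (List String), d.contains name = true →
      (subr_foldA l name d).keys = d.keys := by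
  induction l with
  | nil => intro d _; rfl
  | cons q l ih =>
    intro d hc
    simp only [subr_foldA, List.foldl_cons]
    by_cases hq : name ∈ q.2
    · simp only [if_pos hq]
      rw [show (List.foldl (fun d q => if name ∈ q.2 then d.modify name [] (fun v => v ++ [q.1]) else d)
            (d.modify name [] (fun v => v ++ [q.1])) l) = subr_foldA l name (d.modify name [] (fun v => v ++ [q.1])) from rfl,
          ih _ (by simp [PySem.Dict.contains_modify, hc]),
          PySem.Dict.keys_modify, PySem.Dict.keys_insert_of_contains _ _ hc]
    · simp only [if_neg hq]; exact ih d hc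

-- inserting then scanning adds exactly `name` to the keys (as a Python set would)
theorem stepA_keys (l : List (String × List String)) (name : String)
    (d : PySem.Dict String (List String)) :
    (subr_foldA l name (d.insert name [])).keys = PySem.Set.add d.keys name := by
  rw [innerA_keys l name _ (PySem.Dict.contains_insert_self d name [])]
  by_cases hc : d.contains name = true
  · rw [PySem.Dict.keys_insert_of_contains _ _ hc]
    simp [PySem.Set.add, (PySem.Dict.contains_iff_mem_keys d name).mp hc]
  · rw [PySem.Dict.keys_insert_of_not_contains _ _ (by simpa using hc)]
    have hm : name ∉ d.keys := fun h => hc ((PySem.Dict.contains_iff_mem_keys d name).mpr h)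
    simp [PySem.Set.add, hm]

-- the value A's outer loop leaves at key k
theorem outerA_getD (l : List (String × List String)) (k : String) :
    ∀ (names : List String) (d : PySem.Dict String (List String)),
      (names.foldl (fun d name => subr_foldA l name (d.insert name [])) d).getD k []
        = if k ∈ names then pvParents l k else d.getD k [] := by
  intro names
  induction names with
  | nil => intro d; simp
  | cons n ns ih =>
    intro d
    simp only [List.foldl_cons]
    rw [ih]
    by_cases hns : k ∈ ns
    · simp [hns]
    · by_cases hk : k = n
      · subst hk
        simp [hns, innerA_getD]
      · simp [hns, hk, innerA_getD, PySem.Dict.getD_insert]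

-- the key list A's outer loop builds
theorem outerA_keys (l : List (String × List String)) :
    ∀ (names : List String) (d : PySem.Dict String (List String)),
      (names.foldl (fun d name => subr_foldA l name (d.insert name [])) d).keys
        = PySem.Set.update d.keys names := by
  intro names
  induction names with
  | nil => intro d; rfl
  | cons n ns ih =>
    intro d
    simp only [List.foldl_cons]
    rw [ih, stepA_keys]
    rfl

-- ---- B side ----

-- one setdefault-append pass over a deduplicated child list, seen at key k
theorem innerB_getD (p1 k : String) :
    ∀ (cs : List String), cs.Nodup →
    ∀ d : PySem.Dict String (List String),
      (cs.foldl (fun d c => d.modify c [] (fun v => v ++ [p1])) d).getD k []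
        = d.getD k [] ++ (if k ∈ cs then [p1] else []) := by
  intro cs
  induction cs with
  | nil => intro _ d; simp
  | cons c cs ih =>
    intro hnd d
    have hcns : c ∉ cs := (List.nodup_cons.mp hnd).1
    simp only [List.foldl_cons]
    rw [ih (List.nodup_cons.mp hnd).2, PySem.Dict.getD_modify]
    by_cases hk : k = c
    · subst hk; simp [hcns]
    · by_cases hm : k ∈ cs <;> simp [hm, hk]

-- the parents map B builds: key k holds exactly pvParents l k
theorem parentsB_getD (l : List (String × List String)) (k : String) :
    ∀ d : PySem.Dict String (List String),
      (l.foldl (fun d p => (PySem.List.dedup p.2).foldl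
          (fun d c => d.modify c [] (fun v => v ++ [p.1])) d) d).getD k []
        = d.getD k [] ++ pvParents l k := by
  induction l with
  | nil => intro d; simp [pvParents]
  | cons p l ih =>
    intro d
    simp only [List.foldl_cons]
    rw [ih, innerB_getD p.1 k (PySem.List.dedup p.2) (PySem.List.nodup_dedup _) d]
    by_cases hm : k ∈ p.2 <;>
      simp [pvParents, hm]

-- B's final comprehension: a fold of inserts with a value depending only on the key
theorem readoutB_getD (f : String → List String) (k : String) :
    ∀ (names : List String) (d : PySem.Dict String (List String)),
      (names.foldl (fun d name => d.insert name (f name)) d).getD k []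
        = if k ∈ names then f k else d.getD k [] := by
  intro names
  induction names with
  | nil => intro d; simp
  | cons n ns ih =>
    intro d
    simp only [List.foldl_cons]
    rw [ih]
    by_cases hns : k ∈ ns
    · simp [hns]
    · by_cases hk : k = n <;> simp [hns, hk, PySem.Dict.getD_insert]

-- ===== VERDICT (by name: the statement is the Claim_ definition above) =====
theorem Fortran_subroutine_parents_dict_spec : Claim_equal_Fortran_subroutine_parents_dict := by
  intro l _ hpre
  unfold Pre_Fortran_subroutine_parents_dict at hpre
  unfold Spec_Fortran_subroutine_parents_dict
  unfold Fortran_subroutine_parents_dict Fortran_subroutine_parents_dict_alt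
  simp only []
  set names := l.map Prod.fst with hnames
  have hofl : PySem.Set.ofList names = names := PySem.Set.ofList_eq_self_of_nodup names hpre
  -- A's dict
  have hAkeys : ((names.foldl (fun d name => subr_foldA l name (d.insert name []))
      (PySem.Dict.empty : PySem.Dict String (List String))).keys) = names := by
    rw [outerA_keys]
    simpa [PySem.Dict.keys_empty] using hofl
  have hAitems : (names.foldl (fun d name => subr_foldA l name (d.insert name []))
      (PySem.Dict.empty : PySem.Dict String (List String))).items
      = names.map (fun k => (k, pvParents l k)) := by
    rw [PySem.Dict.items_eq_map_keys _ (by rw [hAkeys]; exact hpre) ([] : List String), hAkeys]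
    refine List.map_congr_left (fun k hk => ?_)
    rw [outerA_getD, if_pos hk]
  -- B's dicts
  set parents := l.foldl (fun d p => (PySem.List.dedup p.2).foldl
      (fun d c => d.modify c [] (fun v => v ++ [p.1])) d)
      (PySem.Dict.empty : PySem.Dict String (List String)) with hparents
  have hBkeys : ((names.foldl (fun d name => d.insert name (parents.getD name []))
      (PySem.Dict.empty : PySem.Dict String (List String))).keys) = names := by
    rw [PySem.Dict.keys_foldl_insert names (fun _ name => parents.getD name []) _]
    simpa [PySem.Dict.keys_empty] using hofl
  have hBitems : (names.foldl (fun d name => d.insert name (parents.getD name []))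
      (PySem.Dict.empty : PySem.Dict String (List String))).items
      = names.map (fun k => (k, pvParents l k)) := by
    rw [PySem.Dict.items_eq_map_keys _ (by rw [hBkeys]; exact hpre) ([] : List String), hBkeys]
    refine List.map_congr_left (fun k hk => ?_)
    rw [readoutB_getD, if_pos hk, hparents, parentsB_getD]
    simp
  exact hAitems.trans hBitems.symm
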